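-- pv_equiv track=rewrite | github.com/mehmetcangurbuz08/Image-Processing-Project | src/Main.py | misalign
-- ===== SOURCE A (Python) =====
-- def misalign(img_matrix):
--
--     for i in range(len(img_matrix[0])):
--         if i % 2 == 1:
--             toptobottomlist = []
--             for a in range(len(img_matrix)):
--                 toptobottomlist.append(img_matrix[a][i])
--             toptobottomlist.reverse()
--             for j in range(len(toptobottomlist)):
--                 img_matrix[j][i] = toptobottomlist[j]
--     return img_matrix
-- ===== SOURCE B (Python) =====
-- def misalign(img_matrix):
--     for i in range(1, len(img_matrix[0]), 2):
--         lo, hi = 0, len(img_matrix) - 1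
--         while lo < hi:
--             img_matrix[lo][i], img_matrix[hi][i] = img_matrix[hi][i], img_matrix[lo][i]
--             lo += 1
--             hi -= 1
--     return img_matrix
-- ===== Notes on version B (the rewrite author's own statement) =====
-- stated objective: simpler
-- what changed: Replaces A's three per-column passes (collect the column, reverse the list, write it back) by a single in-place two-pointer swapping pass per odd column, iterating directly over the odd indices with range(1, c, 2); Pre_ excludes only inputs where A raises IndexError (empty matrix or a row too short for some odd column index).
import Mathlib
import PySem

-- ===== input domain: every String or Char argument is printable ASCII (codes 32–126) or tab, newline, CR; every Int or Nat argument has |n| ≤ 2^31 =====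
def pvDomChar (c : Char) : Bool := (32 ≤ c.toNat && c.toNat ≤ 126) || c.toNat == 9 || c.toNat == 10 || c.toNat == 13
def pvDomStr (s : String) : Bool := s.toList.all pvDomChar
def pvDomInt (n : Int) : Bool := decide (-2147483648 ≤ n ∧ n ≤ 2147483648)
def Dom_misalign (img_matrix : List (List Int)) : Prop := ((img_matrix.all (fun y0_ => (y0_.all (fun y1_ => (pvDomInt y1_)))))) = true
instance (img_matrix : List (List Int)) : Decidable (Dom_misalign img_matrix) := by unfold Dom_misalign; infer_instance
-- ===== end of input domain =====

-- B reverses each odd column in place with one two-pointer swapping pass (range(1, c, 2)) instead of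
-- A's collect/reverse/write-back passes; both mutate their argument in Python, the theorem is about return values.


-- ===== PORT A =====
-- one iteration of A's outer loop: for odd i, collect column i top-to-bottom, reverse it, write it back
def stepA (m : List (List Int)) (i : Int) : List (List Int) :=
  if i % 2 == 1 then
    let col := (PySem.List.pyRange 0 (m.length : Int) 1).foldl
      (fun acc a => acc ++ [PySem.List.pyGetD (PySem.List.pyGetD m a []) i (0 : Int)]) []
    let rev := col.reverse
    (PySem.List.pyRange 0 (rev.length : Int) 1).foldl
      (fun mm j => PySem.List.pySetD mm j
        (PySem.List.pySetD (PySem.List.pyGetD mm j []) i (PySem.List.pyGetD rev j 0))) m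
  else m

-- indexing is ported with pyGetD/pySetD (total with defaults); inputs where Python A raises are excluded by Pre_
def misalign (img_matrix : List (List Int)) : List (List Int) :=
  (PySem.List.pyRange 0 ((PySem.List.pyGetD img_matrix 0 []).length : Int) 1).foldl stepA img_matrix

-- ===== PORT B =====
-- the while loop: two-pointer swap of column i between rows lo and hi
def swapCol (m : List (List Int)) (i lo hi : Int) : List (List Int) :=
  if lo < hi then
    let a := PySem.List.pyGetD (PySem.List.pyGetD m lo []) i (0 : Int)
    let b := PySem.List.pyGetD (PySem.List.pyGetD m hi []) i (0 : Int)
    let m1 := PySem.List.pySetD m lo (PySem.List.pySetD (PySem.List.pyGetD m lo []) i b)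
    let m2 := PySem.List.pySetD m1 hi (PySem.List.pySetD (PySem.List.pyGetD m1 hi []) i a)
    swapCol m2 i (lo + 1) (hi - 1)
  else m
termination_by (hi - lo).toNat
decreasing_by omega

def misalign_alt (img_matrix : List (List Int)) : List (List Int) :=
  (PySem.List.pyRange 1 ((PySem.List.pyGetD img_matrix 0 []).length : Int) 2).foldl
    (fun m i => swapCol m i 0 ((m.length : Int) - 1)) img_matrix

-- ===== PRECONDITION & SPEC =====
-- Pre_ excludes exactly the inputs where Python A raises IndexError: the empty matrix
-- (img_matrix[0]) and jagged matrices with a row too short for some odd column index < len(row 0).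
def Pre_misalign (img_matrix : List (List Int)) : Prop :=
  img_matrix ≠ [] ∧
    ∀ row ∈ img_matrix,
      (if (img_matrix.headD []).length % 2 = 0 then (img_matrix.headD []).length
       else (img_matrix.headD []).length - 1) ≤ row.length
instance (img_matrix : List (List Int)) : Decidable (Pre_misalign img_matrix) := by
  unfold Pre_misalign; infer_instance
def pvWitness_misalign : List (List Int) := [[1, 2], [3, 4]]
def Spec_misalign (img_matrix : List (List Int)) (out : List (List Int)) : Prop := out = misalign_alt img_matrix
instance (img_matrix : List (List Int)) (out : List (List Int)) : Decidable (Spec_misalign img_matrix out) := by unfold Spec_misalign; infer_instance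

-- ===== CLAIM (what is proved, stated in full; the proofs are below) =====
def Claim_equal_misalign : Prop := ∀ (img_matrix : List (List Int)), Dom_misalign img_matrix → Pre_misalign img_matrix → Spec_misalign img_matrix (misalign img_matrix)

-- ===== LEMMAS AND PROOFS =====

-- the column A collects for index i is the i-th entry (with default) of every row
lemma colFold (m : List (List Int)) (i : Int) :
    (PySem.List.pyRange 0 (m.length : Int) 1).foldl
      (fun acc a => acc ++ [PySem.List.pyGetD (PySem.List.pyGetD m a []) i (0 : Int)]) []
    = m.map (fun row => PySem.List.pyGetD row i 0) := by
  rw [PySem.List.foldl_append_singleton_eq_map]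
  conv_rhs => rw [← PySem.List.map_pyGetD_pyRange_zero (xs := m) (d := [])]
  rw [List.map_map]
  rfl

-- the write-back loop, characterized as a map over row indices
lemma writeFold (i : Int) (rev : List Int) (m : List (List Int)) (k : Nat) (hk : k ≤ m.length) :
    ((PySem.List.pyRange 0 (k : Int) 1).foldl
      (fun mm j => PySem.List.pySetD mm j
        (PySem.List.pySetD (PySem.List.pyGetD mm j []) i (PySem.List.pyGetD rev j 0))) m)
    = (List.range m.length).map
        (fun r => if r < k then PySem.List.pySetD (m.getD r []) i (rev.getD r 0) else m.getD r []) := by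
  induction k with
  | zero =>
    rw [PySem.List.pyRange_one_eq_nil (by omega)]
    simp only [List.foldl_nil]
    apply List.ext_getElem (by simp)
    intro r h1 h2
    simp [List.getD_eq_getElem?_getD, List.getElem?_eq_getElem h1]
  | succ k ih =>
    have hc : ((k + 1 : Nat) : Int) = (k : Int) + 1 := by push_cast; ring
    rw [hc, PySem.List.pyRange_one_succ_right (by positivity), List.foldl_append]
    rw [ih (by omega)]
    simp only [List.foldl_cons, List.foldl_nil]
    rw [PySem.List.pySetD_natCast, PySem.List.pyGetD_natCast, PySem.List.pyGetD_natCast]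
    have hgk : ((List.range m.length).map
        (fun r => if r < k then PySem.List.pySetD (m.getD r []) i (rev.getD r 0) else m.getD r [])).getD k []
        = m.getD k [] := by
      rw [List.getD_eq_getElem?_getD]
      have hkm : k < m.length := by omega
      simp [hkm]
    rw [hgk]
    apply List.ext_getElem (by simp)
    intro r h1 h2
    simp only [List.length_set, List.length_map, List.length_range] at h1
    simp only [List.getElem_set, List.getElem_map, List.getElem_range]
    by_cases hrk : k = r
    · subst hrk; simp
    · rw [if_neg hrk]
      by_cases hlt : r < k
      · rw [if_pos hlt, if_pos (by omega)]
      · rw [if_neg hlt, if_neg (by omega)]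

-- closed form of one odd-column step of A
lemma stepA_odd (m : List (List Int)) (i : Int) (h : (i % 2 == 1) = true) :
    stepA m i = (List.range m.length).map
      (fun r => PySem.List.pySetD (m.getD r []) i
        (PySem.List.pyGetD (m.getD (m.length - 1 - r) []) i 0)) := by
  unfold stepA
  rw [if_pos h]
  show (PySem.List.pyRange 0 (((((PySem.List.pyRange 0 (m.length : Int) 1).foldl
      (fun acc a => acc ++ [PySem.List.pyGetD (PySem.List.pyGetD m a []) i (0 : Int)]) []).reverse).length : Int)) 1).foldl _ m = _
  rw [colFold]
  have hrl : ((m.map (fun row => PySem.List.pyGetD row i 0)).reverse).length = m.length := by simp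
  rw [hrl, writeFold i _ m m.length le_rfl]
  apply List.ext_getElem (by simp)
  intro r h1 h2
  simp only [List.getElem_map, List.getElem_range]
  have hr : r < m.length := by simpa using h1
  rw [if_pos hr]
  congr 1
  rw [List.getD_eq_getElem _ _ (by simpa using hr), List.getElem_reverse, List.getElem_map]
  simp only [List.length_map]
  rw [List.getD_eq_getElem _ _ (by omega)]

lemma stepA_even (m : List (List Int)) (i : Int) (h : (i % 2 == 1) = false) :
    stepA m i = m := by
  unfold stepA
  rw [if_neg (by simp [h])]

-- invariant of A's outer loop after the first k column indices
lemma outer_inv (m0 : List (List Int)) (k : Nat) :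
    ((PySem.List.pyRange 0 (k : Int) 1).foldl stepA m0).length = m0.length ∧
    (∀ r, (((PySem.List.pyRange 0 (k : Int) 1).foldl stepA m0).getD r []).length = (m0.getD r []).length) ∧
    (∀ r j, r < m0.length → j < (m0.getD r []).length →
      (((PySem.List.pyRange 0 (k : Int) 1).foldl stepA m0).getD r []).getD j 0 =
        if j % 2 = 1 ∧ j < k then (m0.getD (m0.length - 1 - r) []).getD j 0
        else (m0.getD r []).getD j 0) := by
  induction k with
  | zero =>
    rw [PySem.List.pyRange_one_eq_nil (by omega)]
    refine ⟨by simp, fun r => by simp, fun r j hr hj => ?_⟩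
    simp only [List.foldl_nil]
    rw [if_neg (by omega)]
  | succ k ih =>
    obtain ⟨ihlen, ihrow, ihent⟩ := ih
    have hc : ((k + 1 : Nat) : Int) = (k : Int) + 1 := by push_cast; ring
    rw [hc, PySem.List.pyRange_one_succ_right (by positivity), List.foldl_append,
        List.foldl_cons, List.foldl_nil]
    set O := (PySem.List.pyRange 0 (k : Int) 1).foldl stepA m0 with hO
    by_cases hpar : k % 2 = 1
    · -- odd column: reversed
      have hib : (((k : Int)) % 2 == 1) = true := by
        rw [beq_iff_eq]; omega
      rw [stepA_odd O _ hib, ihlen]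
      refine ⟨by simp, fun r => ?_, fun r j hr hj => ?_⟩
      · -- row lengths
        rcases Nat.lt_or_ge r m0.length with h | h
        · rw [List.getD_eq_getElem _ _ (by simpa using h), List.getElem_map, List.getElem_range]
          simp only [PySem.List.pySetD_natCast, List.length_set]
          exact ihrow r
        · rw [List.getD_eq_default _ _ (by simpa using h), List.getD_eq_default _ _ (by simpa using h)]
      · -- entries
        have hrowval : ((List.range m0.length).map (fun r => PySem.List.pySetD (O.getD r []) (k : Int)
              (PySem.List.pyGetD (O.getD (m0.length - 1 - r) []) (k : Int) 0))).getD r []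
            = PySem.List.pySetD (O.getD r []) (k : Int)
              (PySem.List.pyGetD (O.getD (m0.length - 1 - r) []) (k : Int) 0) := by
          rw [List.getD_eq_getElem?_getD]
          simp [hr]
        rw [hrowval]
        simp only [PySem.List.pySetD_natCast, PySem.List.pyGetD_natCast]
        have hrowlen : (O.getD r []).length = (m0.getD r []).length := ihrow r
        by_cases hjk : j = k
        · subst hjk
          have hin : j < (O.getD r []).length := by omega
          rw [List.getD_eq_getElem _ _ (by simpa [List.length_set] using hin), List.getElem_set]
          rw [if_pos rfl, if_pos ⟨hpar, by omega⟩]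
          have hmir : m0.length - 1 - r < m0.length := by omega
          rcases Nat.lt_or_ge j (m0.getD (m0.length - 1 - r) []).length with hm | hm
          · have := ihent (m0.length - 1 - r) j hmir hm
            rw [this, if_neg (by omega)]
          · rw [List.getD_eq_default _ _ (by rw [ihrow]; omega),
                List.getD_eq_default _ _ hm]
        · have : ((O.getD r []).set k ((O.getD (m0.length - 1 - r) []).getD k 0)).getD j 0
              = (O.getD r []).getD j 0 := by
            simp [List.getD_eq_getElem?_getD, List.getElem?_set_ne (show k ≠ j by omega)]
          rw [this, ihent r j hr hj]
          by_cases hcnd : j % 2 = 1 ∧ j < k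
          · rw [if_pos hcnd, if_pos ⟨hcnd.1, by omega⟩]
          · rw [if_neg hcnd, if_neg (by omega)]
    · -- even column: unchanged
      have hib : (((k : Int)) % 2 == 1) = false := by
        rw [beq_eq_false_iff_ne]; omega
      rw [stepA_even O _ hib]
      refine ⟨ihlen, ihrow, fun r j hr hj => ?_⟩
      rw [ihent r j hr hj]
      by_cases hcnd : j % 2 = 1 ∧ j < k
      · rw [if_pos hcnd, if_pos ⟨hcnd.1, by omega⟩]
      · rw [if_neg hcnd, if_neg (by omega)]

-- closed form of B's two-pointer while loop on column i, pointers at (k, n-1-k)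
lemma swapCol_spec (d : Nat) : ∀ (m : List (List Int)) (iN k : Nat),
    (∀ row ∈ m, iN < row.length) → m.length - 2 * k = d →
    swapCol m (iN : Int) (k : Int) ((m.length : Int) - 1 - (k : Int)) =
      (List.range m.length).map
        (fun r => if k ≤ r ∧ r + k < m.length then
            (m.getD r []).set iN ((m.getD (m.length - 1 - r) []).getD iN 0)
          else m.getD r []) := by
  induction d using Nat.strong_induction_on with
  | _ d ih =>
    intro m iN k hb hd
    by_cases hlt : (k : Int) < (m.length : Int) - 1 - (k : Int)
    · -- loop body runs
      have hk2 : 2 * k + 1 < m.length := by omega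
      have hne : k ≠ m.length - 1 - k := by omega
      rw [swapCol, if_pos hlt]
      have hcast : (m.length : Int) - 1 - (k : Int) = ((m.length - 1 - k : Nat) : Int) := by omega
      rw [hcast]
      simp only [PySem.List.pyGetD_natCast, PySem.List.pySetD_natCast]
      set hi := m.length - 1 - k with hhi
      set b := (m.getD hi []).getD iN 0 with hbdef
      set a := (m.getD k []).getD iN 0 with hadef
      set m1 := m.set k ((m.getD k []).set iN b) with hm1
      set m2 := m1.set hi ((m1.getD hi []).set iN a) with hm2def
      have hm1hi : m1.getD hi [] = m.getD hi [] := by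
        rw [hm1, List.getD_eq_getElem?_getD, List.getElem?_set_ne hne, ← List.getD_eq_getElem?_getD]
      have hm2len : m2.length = m.length := by simp [hm2def, hm1]
      have hm2row : ∀ x, m2.getD x [] =
          if x = k then (m.getD k []).set iN b
          else if x = hi then (m.getD hi []).set iN a
          else m.getD x [] := by
        intro x
        rw [hm2def, hm1hi, List.getD_eq_getElem?_getD]
        by_cases hxh : x = hi
        · subst hxh
          rw [List.getElem?_set_self' ]
          rw [if_neg (by omega), if_pos rfl]
          have : hi < m1.length := by simp [hm1]; omega
          simp [this]
        · rw [List.getElem?_set_ne (by omega)]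
          by_cases hxk : x = k
          · subst hxk
            rw [hm1, List.getElem?_set_self', if_pos rfl]
            have : x < m.length := by omega
            simp [this]
          · rw [if_neg hxk, if_neg hxh, hm1, List.getElem?_set_ne (by omega),
                ← List.getD_eq_getElem?_getD]
      have hm2rowlen : ∀ x, (m2.getD x []).length = (m.getD x []).length := by
        intro x
        rw [hm2row x]
        by_cases h1 : x = k
        · subst h1; rw [if_pos rfl, List.length_set]
        · rw [if_neg h1]
          by_cases h2 : x = hi
          · subst h2; rw [if_pos rfl, List.length_set]
          · rw [if_neg h2]
      have hm2mem : ∀ row ∈ m2, iN < row.length := by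
        intro row hrow
        obtain ⟨x, hx, hxe⟩ := List.mem_iff_getElem.mp hrow
        have : row = m2.getD x [] := by rw [List.getD_eq_getElem _ _ hx, hxe]
        rw [this, hm2rowlen x]
        have hxm : x < m.length := by rw [hm2len] at hx; exact hx
        rw [List.getD_eq_getElem _ _ hxm]
        exact hb _ (List.getElem_mem hxm)
      have hrec := ih (m.length - 2 * (k + 1)) (by omega) m2 iN (k + 1) hm2mem (by omega)
      have harg1 : (k : Int) + 1 = ((k + 1 : Nat) : Int) := by push_cast; ring
      have harg2 : ((m.length - 1 - k : Nat) : Int) - 1 = (m2.length : Int) - 1 - ((k + 1 : Nat) : Int) := by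
        rw [hm2len]; omega
      rw [harg1, harg2, hrec, hm2len]
      apply List.ext_getElem (by simp)
      intro r h1 h2
      simp only [List.getElem_map, List.getElem_range]
      have hr : r < m.length := by simpa using h1
      by_cases hin : k + 1 ≤ r ∧ r + (k + 1) < m.length
      · rw [if_pos hin, if_pos (by omega)]
        have hmir : m.length - 1 - r < m.length := by omega
        rw [hm2row r, if_neg (by omega), if_neg (by omega),
            hm2row (m.length - 1 - r), if_neg (by omega), if_neg (by omega)]
      · rw [if_neg hin, hm2row r]
        by_cases hrk : r = k
        · subst hrk
          rw [if_pos rfl, if_pos (by omega), ← hhi, ← hbdef]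
        · rw [if_neg hrk]
          by_cases hrh : r = hi
          · subst hrh
            rw [if_pos rfl, if_pos (by omega)]
            have : m.length - 1 - hi = k := by omega
            rw [this, hadef]
          · rw [if_neg hrh, if_neg (by omega)]
    · -- loop exits
      rw [swapCol, if_neg hlt]
      apply List.ext_getElem (by simp)
      intro r h1 h2
      simp only [List.getElem_map, List.getElem_range]
      by_cases hc : k ≤ r ∧ r + k < m.length
      · rw [if_pos hc]
        have hr : r = k := by omega
        have hmid : m.length - 1 - r = r := by omega
        subst hr
        rw [hmid]
        have hlen : iN < (m.getD r []).length := by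
          rw [List.getD_eq_getElem _ _ h1]
          exact hb _ (List.getElem_mem h1)
        rw [List.getD_eq_getElem _ _ h1, List.getD_eq_getElem _ _ (by rwa [List.getD_eq_getElem _ _ h1] at hlen),
            List.set_getElem_self]
      · rw [if_neg hc, List.getD_eq_getElem _ _ h1]

-- one full column pass of B: column iN reversed
lemma colStep_spec (m : List (List Int)) (iN : Nat) (hb : ∀ row ∈ m, iN < row.length) :
    swapCol m (iN : Int) 0 ((m.length : Int) - 1) =
      (List.range m.length).map
        (fun r => (m.getD r []).set iN ((m.getD (m.length - 1 - r) []).getD iN 0)) := by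
  have h := swapCol_spec (m.length) m iN 0 hb (by omega)
  simp only [Nat.cast_zero] at h
  rw [show (m.length : Int) - 1 - 0 = (m.length : Int) - 1 by ring] at h
  rw [h]
  apply List.map_congr_left
  intro r hr
  rw [List.mem_range] at hr
  rw [if_pos ⟨Nat.zero_le r, by omega⟩]

-- invariant of B's fold over any duplicate-free list of in-range column indices
lemma foldB (L : List Int) : ∀ (m0 : List (List Int)),
    L.Nodup → (∀ x ∈ L, ∃ iN : Nat, x = (iN : Int) ∧ ∀ row ∈ m0, iN < row.length) →
    (L.foldl (fun m i => swapCol m i 0 ((m.length : Int) - 1)) m0).length = m0.length ∧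
    (∀ r, ((L.foldl (fun m i => swapCol m i 0 ((m.length : Int) - 1)) m0).getD r []).length
        = (m0.getD r []).length) ∧
    (∀ r j, r < m0.length → j < (m0.getD r []).length →
      ((L.foldl (fun m i => swapCol m i 0 ((m.length : Int) - 1)) m0).getD r []).getD j 0 =
        if ((j : Int) ∈ L) then (m0.getD (m0.length - 1 - r) []).getD j 0
        else (m0.getD r []).getD j 0) := by
  induction L with
  | nil =>
    intro m0 _ _
    refine ⟨rfl, fun r => rfl, fun r j hr hj => ?_⟩
    simp only [List.foldl_nil]
    rw [if_neg (by simp)]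
  | cons i L' ih =>
    intro m0 hnd hmem
    obtain ⟨iN, hiN, hbnd⟩ := hmem i List.mem_cons_self
    simp only [List.foldl_cons]
    rw [hiN, colStep_spec m0 iN hbnd]
    set m1 := (List.range m0.length).map
      (fun r => (m0.getD r []).set iN ((m0.getD (m0.length - 1 - r) []).getD iN 0)) with hm1
    have hm1len : m1.length = m0.length := by simp [hm1]
    have hm1row : ∀ x, x < m0.length →
        m1.getD x [] = (m0.getD x []).set iN ((m0.getD (m0.length - 1 - x) []).getD iN 0) := by
      intro x hx
      rw [hm1, List.getD_eq_getElem?_getD]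
      simp [hx]
    have hm1rowlen : ∀ x, (m1.getD x []).length = (m0.getD x []).length := by
      intro x
      rcases Nat.lt_or_ge x m0.length with hx | hx
      · rw [hm1row x hx, List.length_set]
      · rw [List.getD_eq_default _ _ (show m1.length ≤ x by omega),
            List.getD_eq_default _ _ hx]
    have hm1ent : ∀ x, x < m0.length → ∀ j,
        (m1.getD x []).getD j 0 =
          if j = iN then (m0.getD (m0.length - 1 - x) []).getD j 0 else (m0.getD x []).getD j 0 := by
      intro x hx j
      rw [hm1row x hx]
      have hinx : iN < (m0.getD x []).length := by
        rw [List.getD_eq_getElem _ _ hx]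
        exact hbnd _ (List.getElem_mem hx)
      by_cases hji : j = iN
      · subst hji
        rw [if_pos rfl, List.getD_eq_getElem?_getD, List.getElem?_set_self']
        rw [List.getElem?_eq_getElem hinx]
        simp [List.getD_eq_getElem?_getD]
      · rw [if_neg hji, List.getD_eq_getElem?_getD, List.getElem?_set_ne (by omega),
            ← List.getD_eq_getElem?_getD]
    have hmem' : ∀ x ∈ L', ∃ jN : Nat, x = (jN : Int) ∧ ∀ row ∈ m1, jN < row.length := by
      intro x hx
      obtain ⟨jN, hj1, hj2⟩ := hmem x (List.mem_cons_of_mem _ hx)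
      refine ⟨jN, hj1, fun row hrow => ?_⟩
      obtain ⟨y, hy, hye⟩ := List.mem_iff_getElem.mp hrow
      have : row = m1.getD y [] := by rw [List.getD_eq_getElem _ _ hy, hye]
      rw [this, hm1rowlen y]
      have hym : y < m0.length := by rw [hm1len] at hy; exact hy
      rw [List.getD_eq_getElem _ _ hym]
      exact hj2 _ (List.getElem_mem hym)
    obtain ⟨ihlen, ihrow, ihent⟩ := ih m1 (List.Nodup.of_cons hnd) hmem'
    have hinotin : i ∉ L' := (List.nodup_cons.mp hnd).1
    rw [hm1len] at ihlen ihent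
    refine ⟨ihlen, fun r => by rw [ihrow r, hm1rowlen r], fun r j hr hj => ?_⟩
    have hj1 : j < (m1.getD r []).length := by rw [hm1rowlen]; exact hj
    rw [ihent r j hr hj1, hm1ent r hr j]
    by_cases hmL : (j : Int) ∈ L'
    · have hji : j ≠ iN := by
        intro h
        subst h
        rw [← hiN] at hmL
        exact hinotin hmL
      rw [if_pos hmL]
      have hmir : m0.length - 1 - r < m0.length := by omega
      rw [hm1ent (m0.length - 1 - r) hmir j, if_neg hji,
          if_pos (List.mem_cons_of_mem _ hmL)]
    · rw [if_neg hmL]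
      by_cases hji : j = iN
      · rw [if_pos hji, if_pos (by rw [hji, ← hiN]; exact List.mem_cons_self)]
      · rw [if_neg hji, if_neg (by
          intro h
          rcases List.mem_cons.mp h with h | h
          · exact hji (by exact_mod_cast h)
          · exact hmL h)]

lemma nodup_pyRange_two (a b : Int) : (PySem.List.pyRange a b 2).Nodup := by
  rw [PySem.List.pyRange_of_pos a b (by norm_num)]
  exact (List.nodup_range).map (fun x y h => by omega)

lemma headD_eq_pyGetD (m : List (List Int)) : m.headD [] = PySem.List.pyGetD m 0 [] := by
  cases m with
  | nil => simp [PySem.List.pyGetD_zero]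
  | cons x xs => simp [PySem.List.pyGetD_zero]

theorem misalign_eq_alt (m0 : List (List Int)) (hpre : Pre_misalign m0) :
    misalign m0 = misalign_alt m0 := by
  obtain ⟨hne, hrows⟩ := hpre
  set c := (PySem.List.pyGetD m0 0 []).length with hc
  obtain ⟨halen, harow, haent⟩ := outer_inv m0 c
  have hLmem : ∀ x ∈ PySem.List.pyRange 1 (c : Int) 2,
      ∃ iN : Nat, x = (iN : Int) ∧ ∀ row ∈ m0, iN < row.length := by
    intro x hx
    rw [PySem.List.mem_pyRange_iff_of_pos (by norm_num)] at hx
    obtain ⟨hx1, hx2, hx3⟩ := hx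
    refine ⟨x.toNat, by omega, fun row hrow => ?_⟩
    have := hrows row hrow
    rw [headD_eq_pyGetD, ← hc] at this
    by_cases hpar : c % 2 = 0 <;> simp [hpar] at this <;> omega
  obtain ⟨hblen, hbrow, hbent⟩ := foldB (PySem.List.pyRange 1 (c : Int) 2) m0
    (nodup_pyRange_two 1 (c : Int)) hLmem
  unfold misalign misalign_alt
  rw [← hc]
  apply List.ext_getElem (by rw [halen, hblen])
  intro r h1 h2
  have hr : r < m0.length := by rw [halen] at h1; exact h1
  apply List.ext_getElem (by
    rw [← List.getD_eq_getElem _ ([] : List Int) h1, ← List.getD_eq_getElem _ ([] : List Int) h2,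
        harow r, hbrow r])
  intro j hj1 hj2
  have hjr : j < (m0.getD r []).length := by
    rw [← List.getD_eq_getElem _ ([] : List Int) h1, harow r] at hj1
    exact hj1
  have hA : (((PySem.List.pyRange 0 ((c : Nat) : Int) 1).foldl stepA m0)[r]'h1)[j]'hj1
      = (((PySem.List.pyRange 0 ((c : Nat) : Int) 1).foldl stepA m0).getD r []).getD j 0 := by
    rw [List.getD_eq_getElem _ ([] : List Int) h1, List.getD_eq_getElem]
  have hB : (((PySem.List.pyRange 1 ((c : Nat) : Int) 2).foldl
        (fun m i => swapCol m i 0 ((m.length : Int) - 1)) m0)[r]'h2)[j]'hj2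
      = (((PySem.List.pyRange 1 ((c : Nat) : Int) 2).foldl
        (fun m i => swapCol m i 0 ((m.length : Int) - 1)) m0).getD r []).getD j 0 := by
    rw [List.getD_eq_getElem _ ([] : List Int) h2, List.getD_eq_getElem]
  rw [hA, hB, haent r j hr hjr, hbent r j hr hjr]
  have hmemiff : ((j : Int) ∈ PySem.List.pyRange 1 ((c : Nat) : Int) 2) ↔ (j % 2 = 1 ∧ j < c) := by
    rw [PySem.List.mem_pyRange_iff_of_pos (by norm_num)]
    omega
  by_cases hcond : j % 2 = 1 ∧ j < c
  · rw [if_pos hcond, if_pos (hmemiff.mpr hcond)]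
  · rw [if_neg hcond, if_neg (fun h => hcond (hmemiff.mp h))]

-- ===== VERDICT (by name: the statement is the Claim_ definition above) =====
theorem misalign_spec : Claim_equal_misalign := by
  intro m _ hpre
  unfold Spec_misalign
  exact misalign_eq_alt m hpre
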